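-- pv_equiv track=rewrite | github.com/gt2345/Schedule | helper.py | course_handler
-- ===== SOURCE A (Python) =====
-- def course_handler(courses):
--     res = [courses]
--     if len(courses) < 2:
--         return res
--     else:
--         i = 0
--         courses_x = []
--         while i < len(courses) - 2:
--             courses_x.append(courses[i])
--             i += 1
--         courses_x.append(courses[-1])
--         courses_x.append(courses[-2])
--     res.append(courses_x)
--     return res
-- ===== SOURCE B (Python) =====
-- def course_handler(courses):
--     # Build the swapped list BACK-TO-FRONT: consume reversed(courses), emit the
--     # last two elements first (already swapped), then the rest, and reverse once.
--     if len(courses) < 2: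
--         return [courses]
--     it = iter(reversed(courses))
--     last = next(it)
--     second = next(it)
--     rev_swapped = [second, last]
--     rev_swapped.extend(it)
--     rev_swapped.reverse()
--     return [courses, rev_swapped]
-- ===== Notes on version B (the rewrite author's own statement) =====
-- stated objective: alternative
-- what changed: Instead of A's forward index loop copying the prefix and then appending courses[-1], courses[-2], B traverses the list in REVERSE: it emits the last two elements first (already swapped), extends with the remaining reversed elements, and reverses the buffer once at the end.
import Mathlib
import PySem

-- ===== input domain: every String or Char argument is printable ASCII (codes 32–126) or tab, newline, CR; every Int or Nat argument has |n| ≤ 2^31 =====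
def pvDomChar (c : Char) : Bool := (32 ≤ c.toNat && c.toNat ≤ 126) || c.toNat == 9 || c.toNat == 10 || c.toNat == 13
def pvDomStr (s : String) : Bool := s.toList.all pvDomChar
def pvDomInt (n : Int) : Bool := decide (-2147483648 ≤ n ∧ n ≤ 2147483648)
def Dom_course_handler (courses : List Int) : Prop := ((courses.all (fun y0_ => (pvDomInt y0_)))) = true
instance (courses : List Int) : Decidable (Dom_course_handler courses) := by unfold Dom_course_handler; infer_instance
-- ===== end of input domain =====

-- B replaces A's forward index loop by a reverse traversal: it builds the swapped list
-- back-to-front from reversed(courses) and reverses once (objective: alternative).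


-- ===== PORT A =====
def course_handler (courses : List Int) : List (List Int) :=
  let res := [courses]
  if PySem.List.len courses < 2 then res
  else
    -- while i < len(courses) - 2: courses_x.append(courses[i]); i += 1
    let courses_x : List Int := []
    let courses_x := (PySem.List.pyRange 0 (PySem.List.len courses - 2)).foldl
        (fun acc i => acc ++ [PySem.List.pyGetD courses i 0]) courses_x
    let courses_x := courses_x ++ [PySem.List.pyGetD courses (-1) 0]
    let courses_x := courses_x ++ [PySem.List.pyGetD courses (-2) 0]
    res ++ [courses_x]

-- ===== PORT B =====
def course_handler_alt (courses : List Int) : List (List Int) :=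
  if courses.length < 2 then [courses]
  else
    match courses.reverse with
    | last :: second :: restRev =>
      -- rev_swapped = [second, last]; rev_swapped.extend(it); rev_swapped.reverse()
      let revSwapped := [second, last] ++ restRev
      [courses, revSwapped.reverse]
    | _ => [courses]  -- unreachable: courses.length ≥ 2 here

-- ===== PRECONDITION & SPEC =====
def Spec_course_handler (courses : List Int) (out : List (List Int)) : Prop := out = course_handler_alt courses
instance (courses : List Int) (out : List (List Int)) : Decidable (Spec_course_handler courses out) := by unfold Spec_course_handler; infer_instance

-- ===== CLAIM (what is proved, stated in full; the proofs are below) =====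
def Claim_equal_course_handler : Prop := ∀ (courses : List Int), Dom_course_handler courses → Spec_course_handler courses (course_handler courses)

-- ===== LEMMAS AND PROOFS =====

-- The prefix-copying loop of A produces exactly the first n elements.
theorem pv_map_pyGetD_take (xs : List Int) (n : Nat) (h : n ≤ xs.length) :
    (PySem.List.pyRange 0 (n : Int)).map (fun j => PySem.List.pyGetD xs j 0) = xs.take n := by
  induction n with
  | zero => simp [PySem.List.pyRange]
  | succ n ih =>
    have h1 : (0 : Int) ≤ (n : Int) := by positivity
    have hn : n < xs.length := by omega
    have hc : ((n + 1 : Nat) : Int) = (n : Int) + 1 := by push_cast; ring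
    rw [hc, PySem.List.pyRange_one_succ_right h1, List.map_append, ih (by omega)]
    have hg : PySem.List.pyGetD xs (n : Int) 0 = xs[n] := by
      rw [PySem.List.pyGetD_natCast]
      simp [List.getD_eq_getElem?_getD, List.getElem?_eq_getElem hn]
    rw [List.map_singleton, hg, List.take_add_one, List.getElem?_eq_getElem hn]
    simp

-- B's reverse-built buffer, reversed, is the prefix followed by the last two swapped.
theorem revSwapped_eq (xs : List Int) (a b : Int) (r : List Int)
    (hrev : xs.reverse = a :: b :: r) :
    ([b, a] ++ r).reverse = xs.take (xs.length - 2) ++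
      [xs.getD (xs.length - 1) 0, xs.getD (xs.length - 2) 0] := by
  have hxs : xs = r.reverse ++ [b, a] := by
    rw [← List.reverse_reverse xs, hrev]; simp
  subst hxs
  have hlen : (r.reverse ++ [b, a]).length = r.length + 2 := by simp
  rw [hlen]
  have ht : (r.reverse ++ [b, a]).take (r.length + 2 - 2) = r.reverse := by
    rw [show r.length + 2 - 2 = r.length from rfl]
    rw [List.take_append_of_le_length (by simp)]
    simp
  have h1 : (r.reverse ++ [b, a]).getD (r.length + 2 - 1) 0 = a := by
    simp [List.getD_eq_getElem?_getD]
  have h2 : (r.reverse ++ [b, a]).getD (r.length + 2 - 2) 0 = b := by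
    simp [List.getD_eq_getElem?_getD]
  rw [ht, h1, h2]
  simp

theorem course_handler_eq (courses : List Int) :
    course_handler courses = course_handler_alt courses := by
  by_cases h : courses.length < 2
  · simp only [course_handler, course_handler_alt, PySem.List.len]
    rw [if_pos (by omega), if_pos h]
  · have h2 : 2 ≤ courses.length := by omega
    have hcast : (courses.length : Int) - 2 = ((courses.length - 2 : Nat) : Int) := by omega
    obtain ⟨a, b, r, hrev⟩ : ∃ a b r, courses.reverse = a :: b :: r := by
      rcases hR : courses.reverse with _ | ⟨a, _ | ⟨b, r⟩⟩
      · have hl := congrArg List.length hR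
        simp only [List.length_reverse, List.length_nil] at hl; omega
      · have hl := congrArg List.length hR
        simp only [List.length_reverse, List.length_cons, List.length_nil] at hl; omega
      · exact ⟨a, b, r, rfl⟩
    have halt : course_handler_alt courses = [courses, ([b, a] ++ r).reverse] := by
      simp only [course_handler_alt, hrev]
      rw [if_neg h]
    simp only [course_handler, PySem.List.len]
    rw [if_neg (by omega), hcast, PySem.List.foldl_append_singleton_eq_map,
        pv_map_pyGetD_take courses (courses.length - 2) (by omega),
        PySem.List.pyGetD_neg_ofNat courses 1 0 (by omega) (by omega),
        PySem.List.pyGetD_neg_ofNat courses 2 0 (by omega) (by omega),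
        halt, revSwapped_eq courses a b r hrev]
    simp [List.getD_eq_getElem?_getD,
          List.getElem?_eq_getElem (show courses.length - 1 < courses.length by omega),
          List.getElem?_eq_getElem (show courses.length - 2 < courses.length by omega)]

-- ===== VERDICT (by name: the statement is the Claim_ definition above) =====
theorem course_handler_spec : Claim_equal_course_handler := by
  intro courses _
  exact course_handler_eq courses
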